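-- pv_equiv track=rewrite | github.com/sonicFanTech/CDKeyGener | CDKeyGener.py | build_alphabet
-- ===== SOURCE A (Python) =====
-- import string
-- from typing import List, Optional, Tuple
--
-- DEFAULT_ALPHABET_NO_AMBIG = "ABCDEFGHJKMNPQRSTUVWXYZ23456789"
--
-- DEFAULT_ALPHABET_FULL = string.ascii_uppercase + string.digits
--
-- def build_alphabet(custom: Optional[str], avoid_ambiguous: bool) -> str:
--     if custom:
--         alph = custom
--     else:
--         alph = DEFAULT_ALPHABET_NO_AMBIG if avoid_ambiguous else DEFAULT_ALPHABET_FULL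
--
--     # Normalize
--     alph = "".join(dict.fromkeys(alph))  # de-duplicate while keeping order
--     if avoid_ambiguous:
--         for ch in "0O1IL":
--             alph = alph.replace(ch, "")
--     # Safety: remove separators/whitespace
--     alph = "".join(ch for ch in alph if not ch.isspace())
--
--     if len(alph) < 2:
--         raise ValueError("Alphabet is too small. Provide more characters.")
--     return alph
-- ===== SOURCE B (Python) =====
-- import string
--
-- DEFAULT_ALPHABET_NO_AMBIG = "ABCDEFGHJKMNPQRSTUVWXYZ23456789"
-- DEFAULT_ALPHABET_FULL = string.ascii_uppercase + string.digits
--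
-- def _nub(s, banned):
--     # Nub by deletion: take the head, erase every later copy of it from the
--     # rest, recurse on the shrunken remainder (depth = number of distinct chars).
--     if not s:
--         return ""
--     head = s[0]
--     rest = s[1:].replace(head, "")
--     if head.isspace() or head in banned:
--         return _nub(rest, banned)
--     return head + _nub(rest, banned)
--
-- def build_alphabet(custom, avoid_ambiguous):
--     source = custom if custom else (DEFAULT_ALPHABET_NO_AMBIG if avoid_ambiguous else DEFAULT_ALPHABET_FULL)
--     alph = _nub(source, "0O1IL" if avoid_ambiguous else "")
--     if len(alph) < 2:
--         raise ValueError("Alphabet is too small. Provide more characters.")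
--     return alph
-- ===== Notes on version B (the rewrite author's own statement) =====
-- stated objective: alternative
-- what changed: Replaced A's three staged passes (dict.fromkeys ordered dedupe, replace-loop for ambiguous chars, whitespace comprehension) with a recursive nub-by-deletion: take the head, delete all its later copies from the rest with one replace, drop it if whitespace/ambiguous, and recurse on the shrunken remainder — no seen-set or dict is maintained.
import Mathlib
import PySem

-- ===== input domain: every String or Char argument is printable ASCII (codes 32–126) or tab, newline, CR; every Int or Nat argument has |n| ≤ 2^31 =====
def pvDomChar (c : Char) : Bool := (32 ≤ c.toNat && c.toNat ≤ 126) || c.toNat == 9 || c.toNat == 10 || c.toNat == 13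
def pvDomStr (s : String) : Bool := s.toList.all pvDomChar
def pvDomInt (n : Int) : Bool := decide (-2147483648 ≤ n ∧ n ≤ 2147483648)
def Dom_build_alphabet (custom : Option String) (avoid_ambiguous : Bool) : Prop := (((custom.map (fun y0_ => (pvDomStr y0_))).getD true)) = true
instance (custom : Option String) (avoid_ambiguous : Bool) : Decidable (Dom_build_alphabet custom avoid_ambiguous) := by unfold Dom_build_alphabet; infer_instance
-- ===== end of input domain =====

-- B replaces A's three staged passes (ordered dedupe via dict.fromkeys, replace-loop, whitespace
-- filter) with a recursive nub-by-deletion that erases the head's later copies and recurses;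
-- objective: alternative. Pre_ excludes exactly the inputs on which the Python A raises ValueError
-- (normalized alphabet shorter than 2); there both ports return "".


-- s.replace(c, "") for a single character deletes every occurrence of c
-- (stated above the ports because B's port cites it for termination)
theorem replace_single_empty_go (c : Char) (fuel : Nat) :
    ∀ (l acc : List Char), l.length ≤ fuel →
      PySem.Chars.replace.go [c] [] fuel l acc = acc.reverse ++ l.filter (fun x => !(x == c)) := by
  induction fuel with
  | zero =>
    intro l acc h
    have : l = [] := List.eq_nil_of_length_eq_zero (Nat.le_zero.mp h)
    subst this; simp [PySem.Chars.replace.go]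
  | succ n ih =>
    intro l acc h
    cases l with
    | nil => simp [PySem.Chars.replace.go]
    | cons x t =>
      have hpre : ([c].isPrefixOf (x :: t)) = (c == x) := by
        simp [List.isPrefixOf]
      by_cases hx : c = x
      · subst hx
        rw [show PySem.Chars.replace.go [c] [] (n+1) (c :: t) acc
              = PySem.Chars.replace.go [c] [] n t acc from by
            simp [PySem.Chars.replace.go, hpre]]
        rw [ih t acc (by simpa using Nat.le_of_succ_le_succ h)]
        simp
      · have hbe : (c == x) = false := by simp [hx]
        rw [show PySem.Chars.replace.go [c] [] (n+1) (x :: t) acc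
              = PySem.Chars.replace.go [c] [] n t (x :: acc) from by
            simp [PySem.Chars.replace.go, hpre, hbe]]
        rw [ih t (x :: acc) (by simpa using Nat.le_of_succ_le_succ h)]
        have : (x == c) = false := by simp [Ne.symm hx]
        simp [this]

theorem replace_single_empty (c : Char) (l : List Char) :
    PySem.Chars.replace l [c] [] = l.filter (fun x => !(x == c)) := by
  simp [PySem.Chars.replace, replace_single_empty_go c l.length l [] le_rfl]

-- the source string both Pythons start from (custom if truthy, else the matching default)
def pvSource (custom : Option String) (avoid_ambiguous : Bool) : String :=
  match custom with
  | some s => if s == "" then (if avoid_ambiguous then "ABCDEFGHJKMNPQRSTUVWXYZ23456789" else "ABCDEFGHIJKLMNOPQRSTUVWXYZ0123456789") else s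
  | none => if avoid_ambiguous then "ABCDEFGHJKMNPQRSTUVWXYZ23456789" else "ABCDEFGHIJKLMNOPQRSTUVWXYZ0123456789"

-- ===== PORT A =====
def build_alphabet (custom : Option String) (avoid_ambiguous : Bool) : String :=
  let l0 : List Char := (pvSource custom avoid_ambiguous).toList
  -- alph = "".join(dict.fromkeys(alph))  : ordered dedupe
  let l1 : List Char := PySem.List.dedup l0
  -- if avoid_ambiguous: for ch in "0O1IL": alph = alph.replace(ch, "")
  let l2 : List Char :=
    if avoid_ambiguous then
      ['0', 'O', '1', 'I', 'L'].foldl (fun a ch => PySem.Chars.replace a [ch] []) l1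
    else l1
  -- "".join(ch for ch in alph if not ch.isspace())
  let l3 : List Char := l2.filter (fun ch => !PySem.Chars.isspace ch)
  -- if len(alph) < 2: raise ValueError  (excluded by Pre_; "" stands for the raise)
  if l3.length < 2 then "" else String.ofList l3

-- ===== PORT B =====
-- _nub: take the head, erase its later copies (s[1:].replace(head, "")), recurse
def nubChars (banned : List Char) : List Char → List Char
  | [] => []
  | h :: t =>
    if PySem.Chars.isspace h || banned.contains h then
      nubChars banned (PySem.Chars.replace t [h] [])
    else
      h :: nubChars banned (PySem.Chars.replace t [h] [])
termination_by l => l.length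
decreasing_by
  all_goals
    simp only [replace_single_empty, List.length_cons]
    exact Nat.lt_succ_of_le (List.length_filter_le _ _)

def build_alphabet_alt (custom : Option String) (avoid_ambiguous : Bool) : String :=
  let source : List Char := (pvSource custom avoid_ambiguous).toList
  -- 'head in banned' on a constant string = membership in its character list, exact for one char
  let banned : List Char := if avoid_ambiguous then ['0', 'O', '1', 'I', 'L'] else []
  let out : List Char := nubChars banned source
  if out.length < 2 then "" else String.ofList out

-- ===== PRECONDITION & SPEC =====
-- the characters a (src, avoid_ambiguous) run keeps: not whitespace, not ambiguous when the flag is set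
def pvKeep (avoid_ambiguous : Bool) (ch : Char) : Bool :=
  !PySem.Chars.isspace ch && !(avoid_ambiguous && ['0', 'O', '1', 'I', 'L'].contains ch)

-- Pre_ excludes exactly the inputs whose source string holds fewer than 2 distinct kept characters:
-- there the Python A raises ValueError ("Alphabet is too small").
def Pre_build_alphabet (custom : Option String) (avoid_ambiguous : Bool) : Prop :=
  2 ≤ (PySem.List.dedup (((pvSource custom avoid_ambiguous).toList).filter (pvKeep avoid_ambiguous))).length
instance (custom : Option String) (avoid_ambiguous : Bool) : Decidable (Pre_build_alphabet custom avoid_ambiguous) := by unfold Pre_build_alphabet; infer_instance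

def pvWitness_build_alphabet : Option String × Bool := (some "AB", false)

def Spec_build_alphabet (custom : Option String) (avoid_ambiguous : Bool) (out : String) : Prop := out = build_alphabet_alt custom avoid_ambiguous
instance (custom : Option String) (avoid_ambiguous : Bool) (out : String) : Decidable (Spec_build_alphabet custom avoid_ambiguous out) := by unfold Spec_build_alphabet; infer_instance

-- ===== CLAIM (what is proved, stated in full; the proofs are below) =====
def Claim_equal_build_alphabet : Prop := ∀ (custom : Option String) (avoid_ambiguous : Bool), Dom_build_alphabet custom avoid_ambiguous → Pre_build_alphabet custom avoid_ambiguous → Spec_build_alphabet custom avoid_ambiguous (build_alphabet custom avoid_ambiguous)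

-- ===== LEMMAS AND PROOFS =====

-- proof-side reference nub (keeps first occurrences, no side conditions)
def nubA : List Char → List Char
  | [] => []
  | h :: t => h :: nubA (t.filter (fun x => !(x == h)))
termination_by l => l.length
decreasing_by
  simp
  exact le_trans (List.length_filter_le _ _) (le_of_eq List.length_attach)

-- B's recursion = filter by the keep-predicate, then reference nub
theorem nubChars_eq (banned : List Char) :
    ∀ (n : Nat) (l : List Char), l.length ≤ n →
      nubChars banned l
        = nubA (l.filter (fun ch => !(PySem.Chars.isspace ch || banned.contains ch))) := by
  intro n
  induction n with
  | zero =>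
    intro l h
    have : l = [] := List.eq_nil_of_length_eq_zero (Nat.le_zero.mp h)
    subst this; rw [nubChars, List.filter_nil, nubA]
  | succ n ih =>
    intro l h
    cases l with
    | nil => rw [nubChars, List.filter_nil, nubA]
    | cons x t =>
      have hlen : (PySem.Chars.replace t [x] []).length ≤ n := by
        rw [replace_single_empty]
        exact le_trans (List.length_filter_le _ _) (Nat.le_of_succ_le_succ h)
      by_cases hx : (PySem.Chars.isspace x || banned.contains x) = true
      · rw [show nubChars banned (x :: t) = nubChars banned (PySem.Chars.replace t [x] []) from by
            rw [nubChars, if_pos hx]]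
        rw [ih _ hlen, replace_single_empty, List.filter_filter]
        have hdrop : ((x :: t).filter (fun ch => !(PySem.Chars.isspace ch || banned.contains ch)))
            = t.filter (fun ch => !(PySem.Chars.isspace ch || banned.contains ch)) := by
          rw [List.filter_cons_of_neg]; rw [hx]; simp
        rw [hdrop]
        congr 1
        apply List.filter_congr
        intro c _
        by_cases hc : c = x
        · subst hc; rw [hx]; simp
        · simp [hc]
      · have hx' : (PySem.Chars.isspace x || banned.contains x) = false := by
          revert hx; cases (PySem.Chars.isspace x || banned.contains x) <;> simp
        rw [show nubChars banned (x :: t) = x :: nubChars banned (PySem.Chars.replace t [x] []) from by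
            rw [nubChars, if_neg hx]]
        rw [ih _ hlen, replace_single_empty, List.filter_filter]
        have hkeep : ((x :: t).filter (fun ch => !(PySem.Chars.isspace ch || banned.contains ch)))
            = x :: t.filter (fun ch => !(PySem.Chars.isspace ch || banned.contains ch)) := by
          rw [List.filter_cons_of_pos]; rw [hx']; rfl
        rw [hkeep, nubA, List.filter_filter]
        congr 2
        apply List.filter_congr
        intro c _
        by_cases hc : c = x <;> simp [hc, Bool.and_comm]

-- PySem's ordered dedupe (foldl Set.add) = the reference nub of the not-yet-seen elements
theorem foldl_add_eq_nubA :
    ∀ (l acc : List Char),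
      l.foldl PySem.Set.add acc = acc ++ nubA (l.filter (fun c => !acc.contains c)) := by
  intro l
  induction l with
  | nil => intro acc; rw [List.foldl_nil, List.filter_nil, nubA, List.append_nil]
  | cons x t ih =>
    intro acc
    rw [List.foldl_cons]
    by_cases hmem : acc.contains x = true
    · have hadd : PySem.Set.add acc x = acc := by
        simp only [PySem.Set.add, PySem.Set.contains]
        rw [if_pos hmem]
      rw [hadd, ih, List.filter_cons_of_neg (by rw [hmem]; simp)]
    · have hmem' : acc.contains x = false := by
        revert hmem; cases acc.contains x <;> simp
      have hadd : PySem.Set.add acc x = acc ++ [x] := by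
        simp only [PySem.Set.add, PySem.Set.contains]
        rw [if_neg hmem]
      rw [hadd, ih, List.filter_cons_of_pos (by rw [hmem']; rfl), nubA, List.filter_filter]
      rw [List.append_assoc, List.singleton_append]
      congr 2
      congr 1
      apply List.filter_congr
      intro a _
      by_cases ha : a = x
      · subst ha; simp
      · simp [ha]

theorem dedup_eq_nubA (l : List Char) : PySem.List.dedup l = nubA l := by
  have := foldl_add_eq_nubA l []
  simpa [PySem.List.dedup, PySem.Set.ofList, PySem.Set.empty] using this

-- filtering commutes with ordered dedupe
theorem foldl_add_filter (q : Char → Bool) :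
    ∀ (l acc : List Char),
      (l.foldl PySem.Set.add acc).filter q = (l.filter q).foldl PySem.Set.add (acc.filter q) := by
  intro l
  induction l with
  | nil => intro acc; rfl
  | cons x t ih =>
    intro acc
    by_cases hq : q x = true
    · simp only [List.foldl_cons, List.filter_cons, hq, if_pos, List.foldl_cons]
      rw [ih]
      congr 1
      simp only [PySem.Set.add, PySem.Set.contains]
      by_cases hm : x ∈ acc
      · rw [if_pos (by simpa using hm), if_pos]
        simp only [List.contains_iff_mem] at *
        exact List.mem_filter.mpr ⟨hm, hq⟩
      · rw [if_neg (by simpa using hm), if_neg]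
        · simp [List.filter_append, hq]
        · simp only [List.contains_iff_mem]
          intro hmem
          exact hm (List.mem_filter.mp hmem).1
    · simp only [List.foldl_cons, List.filter_cons, hq, if_neg, Bool.false_eq_true, not_false_iff]
      rw [ih]
      congr 1
      simp only [PySem.Set.add]
      split
      · rfl
      · simp [List.filter_append, hq]

theorem dedup_filter (q : Char → Bool) (l : List Char) :
    (PySem.List.dedup l).filter q = PySem.List.dedup (l.filter q) := by
  simpa [PySem.List.dedup, PySem.Set.ofList, PySem.Set.empty] using foldl_add_filter q l PySem.Set.empty

-- A's replace-loop (avoid = true branch) deletes exactly the ambiguous characters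
theorem replace_loop_eq (l : List Char) :
    ['0', 'O', '1', 'I', 'L'].foldl (fun a ch => PySem.Chars.replace a [ch] []) l
      = l.filter (fun ch => !(['0', 'O', '1', 'I', 'L'].contains ch)) := by
  simp only [List.foldl_cons, List.foldl_nil, replace_single_empty, List.filter_filter]
  apply List.filter_congr
  intro x _
  by_cases h0 : x = '0' <;> by_cases hO : x = 'O' <;> by_cases h1 : x = '1' <;>
    by_cases hI : x = 'I' <;> by_cases hL : x = 'L' <;> simp_all

-- the two normalized character lists coincide
theorem lists_eq (custom : Option String) (avoid : Bool) :
    (let l1 := PySem.List.dedup (pvSource custom avoid).toList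
     let l2 := if avoid then ['0', 'O', '1', 'I', 'L'].foldl (fun a ch => PySem.Chars.replace a [ch] []) l1 else l1
     l2.filter (fun ch => !PySem.Chars.isspace ch))
    = nubChars (if avoid then ['0', 'O', '1', 'I', 'L'] else []) (pvSource custom avoid).toList := by
  set src := (pvSource custom avoid).toList with hsrc
  rw [nubChars_eq _ src.length src le_rfl, ← dedup_eq_nubA, ← dedup_filter]
  cases avoid with
  | false =>
    simp only [if_neg, Bool.false_eq_true, not_false_iff]
    apply List.filter_congr
    intro x _
    simp
  | true =>
    simp only [if_pos, replace_loop_eq, List.filter_filter]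
    apply List.filter_congr
    intro x _
    by_cases hs : PySem.Chars.isspace x <;>
      by_cases hb : (['0', 'O', '1', 'I', 'L'].contains x) = true <;> simp [hs]

-- ===== VERDICT (by name: the statement is the Claim_ definition above) =====
theorem build_alphabet_spec : Claim_equal_build_alphabet := by
  intro custom avoid _ _
  unfold Spec_build_alphabet build_alphabet build_alphabet_alt
  simp only []
  rw [lists_eq custom avoid]
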